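-- pv_equiv track=rewrite | github.com/miliar/Code_Jam_Webscraper | solutions_python/Problem_138/669.py | solve_deceiful
-- ===== SOURCE A (Python) =====
-- def solve_deceiful(naomi, ken):
--     naomi = list(naomi)
--     ken = list(ken)
--
--     pt = 0
--     while naomi:
--         if naomi[0] > ken[0]:
--             pt += 1
--             ken.pop(0)
--         else:
--             ken.pop(-1)
--
--         naomi.pop(0)
--
--     return pt
-- ===== SOURCE B (Python) =====
-- def solve_deceiful(naomi, ken):
--     pt = 0
--     for v in naomi:
--         if v > ken[pt]:
--             pt += 1
--     return pt
-- ===== Notes on version B (the rewrite author's own statement) =====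
-- stated objective: faster
-- what changed: Replaces A's destructive O(n^2) list.pop(0)/pop(-1) loop with a single pass over naomi keeping one front index (the win count itself) into an unmodified ken, using that back-pops never affect the element A reads next.
import Mathlib
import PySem

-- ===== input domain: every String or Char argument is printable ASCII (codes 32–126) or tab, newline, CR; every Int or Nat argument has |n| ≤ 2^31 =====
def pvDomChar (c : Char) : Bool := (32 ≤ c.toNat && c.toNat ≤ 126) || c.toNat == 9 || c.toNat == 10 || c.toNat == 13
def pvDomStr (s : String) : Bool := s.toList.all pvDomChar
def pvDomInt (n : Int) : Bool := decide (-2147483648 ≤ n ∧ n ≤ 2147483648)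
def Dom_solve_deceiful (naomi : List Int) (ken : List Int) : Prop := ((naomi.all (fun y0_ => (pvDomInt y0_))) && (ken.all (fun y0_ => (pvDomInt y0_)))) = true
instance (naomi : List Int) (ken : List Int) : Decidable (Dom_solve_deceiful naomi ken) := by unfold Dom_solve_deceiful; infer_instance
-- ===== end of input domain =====

-- B replaces A's destructive pop(0)/pop(-1) loop by one pass over naomi with a
-- front index (the win count) into an unmodified ken: asymptotically faster (O(n) vs O(n^2)).

-- ===== PORT A =====
-- A's while-loop: state = (remaining naomi, current ken list, pt).
-- ken.pop(0) = drop the head; ken.pop(-1) = dropLast (exact for nonempty lists).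
-- When ken is empty but naomi is not, Python raises IndexError (excluded by Pre_);
-- the port returns pt there as a placeholder.
def solveDeceifulLoopA : List Int → List Int → Int → Int
  | [], _, pt => pt
  | _ :: _, [], pt => pt           -- Python: IndexError (outside Pre_)
  | n :: ns, k0 :: ks, pt =>
      if n > k0 then solveDeceifulLoopA ns ks (pt + 1)
      else solveDeceifulLoopA ns (List.dropLast (k0 :: ks)) pt

def solve_deceiful (naomi : List Int) (ken : List Int) : Int :=
  solveDeceifulLoopA naomi ken 0

-- ===== PORT B =====
-- Source B: pt = 0; for v in naomi: if v > ken[pt]: pt += 1; return pt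
def solve_deceiful_alt (naomi : List Int) (ken : List Int) : Int :=
  naomi.foldl (fun pt v => if v > PySem.List.pyGetD ken pt 0 then pt + 1 else pt) 0

-- ===== PRECONDITION & SPEC =====
-- Pre_ excludes exactly the inputs where A raises IndexError: naomi longer than ken.
def Pre_solve_deceiful (naomi : List Int) (ken : List Int) : Prop :=
  naomi.length ≤ ken.length
instance (naomi : List Int) (ken : List Int) : Decidable (Pre_solve_deceiful naomi ken) := by
  unfold Pre_solve_deceiful; infer_instance

def pvWitness_solve_deceiful : List Int × List Int := ([3, 1, 4], [2, 5, 2])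

def Spec_solve_deceiful (naomi : List Int) (ken : List Int) (out : Int) : Prop := out = solve_deceiful_alt naomi ken
instance (naomi : List Int) (ken : List Int) (out : Int) : Decidable (Spec_solve_deceiful naomi ken out) := by unfold Spec_solve_deceiful; infer_instance

-- ===== CLAIM (what is proved, stated in full; the proofs are below) =====
def Claim_equal_solve_deceiful : Prop := ∀ (naomi : List Int) (ken : List Int), Dom_solve_deceiful naomi ken → Pre_solve_deceiful naomi ken → Spec_solve_deceiful naomi ken (solve_deceiful naomi ken)

-- ===== LEMMAS AND PROOFS =====

-- Intermediate loop: A's loop after forgetting back-pops — on a loss it keeps ken unchanged.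
def solveDeceifulLoopM : List Int → List Int → Int → Int
  | [], _, pt => pt
  | _ :: _, [], pt => pt
  | n :: ns, k0 :: ks, pt =>
      if n > k0 then solveDeceifulLoopM ns ks (pt + 1)
      else solveDeceifulLoopM ns (k0 :: ks) pt

-- dropping the last element of k does not change M's result while k is long enough
theorem loopM_dropLast (ns : List Int) : ∀ (k : List Int) (pt : Int),
    ns.length < k.length →
    solveDeceifulLoopM ns (List.dropLast k) pt = solveDeceifulLoopM ns k pt := by
  induction ns with
  | nil => intro k pt _; simp [solveDeceifulLoopM]
  | cons n ns ih =>
      intro k pt h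
      match k with
      | [] => simp at h
      | [k0] => simp at h
      | k0 :: k1 :: kr =>
          have hdl : List.dropLast (k0 :: k1 :: kr) = k0 :: List.dropLast (k1 :: kr) := by
            simp
          rw [hdl]
          simp only [solveDeceifulLoopM]
          split
          · exact ih (k1 :: kr) (pt + 1) (by simpa using Nat.lt_of_succ_lt_succ h)
          · rw [← hdl]
            exact ih (k0 :: k1 :: kr) pt (by simpa using Nat.lt_of_succ_lt h)

-- A's loop equals M while ken is long enough
theorem loopA_eq_loopM (ns : List Int) : ∀ (k : List Int) (pt : Int),
    ns.length ≤ k.length →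
    solveDeceifulLoopA ns k pt = solveDeceifulLoopM ns k pt := by
  induction ns with
  | nil => intro k pt _; cases k <;> simp [solveDeceifulLoopA, solveDeceifulLoopM]
  | cons n ns ih =>
      intro k pt h
      match k with
      | [] => simp at h
      | k0 :: ks =>
          simp only [solveDeceifulLoopA, solveDeceifulLoopM]
          split
          · exact ih ks (pt + 1) (by simpa using h)
          · have hlen : ns.length < (k0 :: ks).length := by
              simpa using Nat.lt_of_succ_le h
            rw [ih (List.dropLast (k0 :: ks)) pt (by simpa using Nat.le_of_lt_succ (by simpa using h))]
            exact loopM_dropLast ns (k0 :: ks) pt hlen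

-- M on the suffix ken.drop c with counter c equals B's fold over the fixed ken
theorem loopM_eq_foldB (ns : List Int) : ∀ (ken : List Int) (c : Nat),
    ns.length ≤ (ken.drop c).length →
    solveDeceifulLoopM ns (ken.drop c) (c : Int) =
      ns.foldl (fun pt v => if v > PySem.List.pyGetD ken pt 0 then pt + 1 else pt) (c : Int) := by
  induction ns with
  | nil => intro ken c _; cases h : ken.drop c <;> simp [solveDeceifulLoopM]
  | cons n ns ih =>
      intro ken c h
      match hk : ken.drop c with
      | [] => rw [hk] at h; simp at h
      | k0 :: ks =>
          have hc : c < ken.length := by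
            have := congrArg List.length hk
            simp at this; omega
          have hdc := List.drop_eq_getElem_cons hc
          rw [hk] at hdc
          have hk0 : ken[c] = k0 := (List.cons.injEq .. ▸ hdc).1.symm
          have hks : ken.drop (c + 1) = ks := (List.cons.injEq .. ▸ hdc).2.symm
          have hget : PySem.List.pyGetD ken (c : Int) 0 = k0 := by
            rw [PySem.List.pyGetD_natCast, List.getD_eq_getElem ken 0 hc, hk0]
          simp only [solveDeceifulLoopM, List.foldl_cons, hget]
          have hlen : ns.length ≤ ks.length := by
            rw [hk] at h; simpa using h
          split
          · have hcast : ((c : Int) + 1) = ((c + 1 : Nat) : Int) := by push_cast; ring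
            rw [hcast, ← hks]
            exact ih ken (c + 1) (by rw [hks]; exact hlen)
          · rw [← hk]
            exact ih ken c (by rw [hk]; simpa using Nat.le_succ_of_le hlen)

-- ===== VERDICT (by name: the statement is the Claim_ definition above) =====
theorem solve_deceiful_spec : Claim_equal_solve_deceiful := by
  intro naomi ken _ hpre
  unfold Spec_solve_deceiful solve_deceiful solve_deceiful_alt
  rw [loopA_eq_loopM naomi ken 0 hpre]
  have := loopM_eq_foldB naomi ken 0 (by simpa using hpre)
  simpa using this
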